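-- pv_equiv track=rewrite | github.com/Vivekkmr91/Cognate | ai_antivirus/core/ml_engine.py | check_obfuscation
-- ===== SOURCE A (Python) =====
-- def check_obfuscation(text: str) -> bool:
--     """Check if code is obfuscated"""
--     indicators = [
--         # Long base64 strings
--         len(text) > 1000 and text.count('=') > 50,
--         # Hex encoding
--         '\\x' in text and text.count('\\x') > 20,
--         # Unicode escapes
--         '\\u' in text and text.count('\\u') > 20,
--         # Excessive string concatenation
--         text.count('+') > 100,
--         # Variable names with random characters
--         any(len(word) > 30 for word in text.split()),
--     ]
--
--     return any(indicators)
-- ===== SOURCE B (Python) =====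
-- def check_obfuscation(text: str) -> bool:
--     """Check if code is obfuscated (single-pass counter scan)."""
--     eq = plus = bx = bu = 0
--     run = maxrun = 0
--     prev = ''
--     for c in text:
--         if c.isspace():
--             run = 0
--         else:
--             run += 1
--             if run > maxrun:
--                 maxrun = run
--         if c == '=':
--             eq += 1
--         elif c == '+':
--             plus += 1
--         elif prev == '\\':
--             if c == 'x':
--                 bx += 1
--             elif c == 'u':
--                 bu += 1
--         prev = c
--     return (len(text) > 1000 and eq > 50) or bx > 20 or bu > 20 or plus > 100 or maxrun > 30
-- ===== Notes on version B (the rewrite author's own statement) =====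
-- stated objective: alternative
-- what changed: B replaces A's five separate library scans of the text (three substring count() passes, two membership scans and a whitespace split) by a single character-by-character pass maintaining integer counters for the equals sign, the plus sign and the two backslash escape pairs via a previous-character tracker, plus the maximum contiguous non-whitespace run length, then tests the same thresholds.
import Mathlib
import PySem

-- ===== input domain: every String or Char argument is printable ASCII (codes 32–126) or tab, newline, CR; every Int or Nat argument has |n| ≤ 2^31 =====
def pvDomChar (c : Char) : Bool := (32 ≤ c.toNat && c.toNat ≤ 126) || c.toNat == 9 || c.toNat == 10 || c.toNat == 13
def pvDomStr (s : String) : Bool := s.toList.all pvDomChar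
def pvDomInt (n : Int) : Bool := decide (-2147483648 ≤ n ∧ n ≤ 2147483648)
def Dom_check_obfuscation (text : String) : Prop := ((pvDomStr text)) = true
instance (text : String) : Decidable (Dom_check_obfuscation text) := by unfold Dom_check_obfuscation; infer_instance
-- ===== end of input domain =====

-- B replaces A's five separate library scans (four count()/in scans and a split()) by a single
-- character pass maintaining small counters and a max-run tracker (objective: alternative, one traversal).

-- ===== PORT A =====
def check_obfuscation (text : String) : Bool :=
  let indicators : List Bool := [
    decide (1000 < PySem.Str.len text) && decide (50 < PySem.Str.count text "="),
    PySem.Str.isIn "\\x" text && decide (20 < PySem.Str.count text "\\x"),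
    PySem.Str.isIn "\\u" text && decide (20 < PySem.Str.count text "\\u"),
    decide (100 < PySem.Str.count text "+"),
    (PySem.Str.split₀ text).any (fun word => decide ((30 : Int) < PySem.Str.len word))]
  indicators.any id

-- ===== PORT B =====
structure ObState where
  eq : Nat
  plus : Nat
  bx : Nat
  bu : Nat
  run : Nat
  maxrun : Nat
  prev : Option Char
deriving Repr, DecidableEq

-- one loop iteration of Source B (prev = '' at the start is `none` here)
def obStep (st : ObState) (c : Char) : ObState :=
  let st1 :=
    if PySem.Chars.isspace c then { st with run := 0 }
    else if st.maxrun < st.run + 1 then { st with run := st.run + 1, maxrun := st.run + 1 }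
    else { st with run := st.run + 1 }
  let st2 :=
    if c = '=' then { st1 with eq := st1.eq + 1 }
    else if c = '+' then { st1 with plus := st1.plus + 1 }
    else if st1.prev = some '\\' then
      (if c = 'x' then { st1 with bx := st1.bx + 1 }
       else if c = 'u' then { st1 with bu := st1.bu + 1 }
       else st1)
    else st1
  { st2 with prev := some c }

def check_obfuscation_alt (text : String) : Bool :=
  let st := text.toList.foldl obStep ⟨0, 0, 0, 0, 0, 0, none⟩
  (decide (1000 < PySem.Str.len text) && decide (50 < st.eq)) || decide (20 < st.bx)
    || decide (20 < st.bu) || decide (100 < st.plus) || decide (30 < st.maxrun)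

-- ===== PRECONDITION & SPEC =====
def Spec_check_obfuscation (text : String) (out : Bool) : Prop := out = check_obfuscation_alt text
instance (text : String) (out : Bool) : Decidable (Spec_check_obfuscation text out) := by unfold Spec_check_obfuscation; infer_instance

-- ===== CLAIM (what is proved, stated in full; the proofs are below) =====
def Claim_equal_check_obfuscation : Prop := ∀ (text : String), Dom_check_obfuscation text → Spec_check_obfuscation text (check_obfuscation text)

-- ===== LEMMAS AND PROOFS =====

-- prev-based sliding count of the two-char pattern '\'·b, as Source B's loop performs it
def slide (b : Char) (p : Option Char) : List Char → Nat
  | [] => 0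
  | c :: t => (if p = some '\\' ∧ c = b then 1 else 0) + slide b (some c) t

-- non-overlapping left-to-right count of the pattern '\'·b (the shape of Chars.count.go)
def pairSkip (b : Char) : List Char → Nat
  | [] => 0
  | [_] => 0
  | c :: d :: t => if c = '\\' ∧ d = b then 1 + pairSkip b t else pairSkip b (d :: t)

-- run/maxrun trackers of Source B's loop
def rnAux (run : Nat) : List Char → Nat
  | [] => run
  | c :: t => rnAux (if PySem.Chars.isspace c then 0 else run + 1) t

def mxAux (run m : Nat) : List Char → Nat
  | [] => m
  | c :: t =>
    if PySem.Chars.isspace c then mxAux 0 m t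
    else mxAux (run + 1) (if m < run + 1 then run + 1 else m) t

def lastAux (p : Option Char) : List Char → Option Char
  | [] => p
  | c :: t => lastAux (some c) t

theorem obStep_eq_comp (st : ObState) (c : Char) :
    (obStep st c).eq = if c = '=' then st.eq + 1 else st.eq := by
  simp only [obStep]; split_ifs <;> simp_all

theorem obStep_plus_comp (st : ObState) (c : Char) :
    (obStep st c).plus = if c = '+' then st.plus + 1 else st.plus := by
  simp only [obStep]; split_ifs <;> simp_all

theorem obStep_bx_comp (st : ObState) (c : Char) :
    (obStep st c).bx = if st.prev = some '\\' ∧ c = 'x' then st.bx + 1 else st.bx := by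
  simp only [obStep]; split_ifs <;> simp_all

theorem obStep_bu_comp (st : ObState) (c : Char) :
    (obStep st c).bu = if st.prev = some '\\' ∧ c = 'u' then st.bu + 1 else st.bu := by
  simp only [obStep]; split_ifs <;> simp_all

theorem obStep_run_comp (st : ObState) (c : Char) :
    (obStep st c).run = if PySem.Chars.isspace c then 0 else st.run + 1 := by
  simp only [obStep]; split_ifs <;> simp_all

theorem obStep_maxrun_comp (st : ObState) (c : Char) :
    (obStep st c).maxrun = if PySem.Chars.isspace c then st.maxrun
      else (if st.maxrun < st.run + 1 then st.run + 1 else st.maxrun) := by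
  simp only [obStep]; split_ifs <;> simp_all

theorem obStep_prev_comp (st : ObState) (c : Char) : (obStep st c).prev = some c := by
  simp [obStep]

theorem fold_obStep (s : List Char) (st : ObState) :
    s.foldl obStep st =
      ⟨st.eq + s.count '=', st.plus + s.count '+',
       st.bx + slide 'x' st.prev s, st.bu + slide 'u' st.prev s,
       rnAux st.run s, mxAux st.run st.maxrun s, lastAux st.prev s⟩ := by
  induction s generalizing st with
  | nil => cases st; simp [slide, rnAux, mxAux, lastAux]
  | cons c t ih =>
    rw [List.foldl_cons, ih]
    refine ObState.mk.injEq .. ▸ ?_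
    refine ⟨?_, ?_, ?_, ?_, ?_, ?_, ?_⟩
    · rw [obStep_eq_comp, List.count_cons]
      by_cases h : c = '=' <;> simp [h] <;> try omega
    · rw [obStep_plus_comp, List.count_cons]
      by_cases h : c = '+' <;> simp [h] <;> try omega
    · rw [obStep_bx_comp, obStep_prev_comp, slide]
      split_ifs with h <;> omega
    · rw [obStep_bu_comp, obStep_prev_comp, slide]
      split_ifs with h <;> omega
    · rw [obStep_run_comp]; rw [rnAux]
    · rw [obStep_run_comp, obStep_maxrun_comp]
      rw [mxAux]
      split_ifs <;> rfl
    · rw [obStep_prev_comp]; rw [lastAux]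

theorem pairSkip_cons_ne (b c : Char) (t : List Char) (h : c ≠ '\\') :
    pairSkip b (c :: t) = pairSkip b t := by
  cases t with
  | nil => simp [pairSkip]
  | cons d u => simp [pairSkip, h]

theorem slide_eq (b : Char) (hb : b ≠ '\\') (s : List Char) (p : Option Char) :
    slide b p s = pairSkip b ((if p = some '\\' then ['\\'] else []) ++ s) := by
  induction s generalizing p with
  | nil => split_ifs <;> simp [slide, pairSkip]
  | cons c t ih =>
    have hbr : pairSkip b ((if (some c : Option Char) = some '\\' then ['\\'] else []) ++ t)
        = pairSkip b (c :: t) := by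
      by_cases hcb : c = '\\'
      · simp [hcb]
      · simp [hcb, pairSkip_cons_ne b c t hcb]
    rw [slide, ih (some c), hbr]
    by_cases hp : p = some '\\'
    · by_cases hc : c = b
      · rw [if_pos ⟨hp, hc⟩, if_pos hp]
        have h2 : pairSkip b (c :: t) = pairSkip b t :=
          pairSkip_cons_ne b c t (by rw [hc]; exact hb)
        have h1 : pairSkip b ('\\' :: c :: t) = 1 + pairSkip b t := by
          simp [pairSkip, hc]
        simp [h1, h2]
      · rw [if_neg (by simp [hc]), if_pos hp]
        have h1 : pairSkip b ('\\' :: c :: t) = pairSkip b (c :: t) := by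
          simp [pairSkip, hc]
        simp [h1]
    · rw [if_neg (by simp [hp]), if_neg hp]
      simp

theorem countGo_zero (sub : List Char) (s : List Char) (acc : Nat) :
    PySem.Chars.count.go sub 0 s acc = acc := by cases s <;> rfl

theorem countGo_succ_nil (sub : List Char) (f : Nat) (acc : Nat) :
    PySem.Chars.count.go sub (f + 1) [] acc = acc := rfl

theorem countGo_succ_cons (sub : List Char) (f : Nat) (c : Char) (t : List Char) (acc : Nat) :
    PySem.Chars.count.go sub (f + 1) (c :: t) acc =
      if sub.isPrefixOf (c :: t) = true then
        PySem.Chars.count.go sub f (List.drop sub.length (c :: t)) (acc + 1)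
      else PySem.Chars.count.go sub f t acc := rfl

theorem countGo_pair (b : Char) (fuel : Nat) (s : List Char) (acc : Nat)
    (h : s.length ≤ fuel) : PySem.Chars.count.go ['\\', b] fuel s acc = acc + pairSkip b s := by
  induction fuel generalizing s acc with
  | zero =>
    have hs : s = [] := List.eq_nil_of_length_eq_zero (Nat.le_zero.1 h)
    subst hs
    rw [countGo_zero]
    simp [pairSkip]
  | succ f ih =>
    cases s with
    | nil => rw [countGo_succ_nil]; simp [pairSkip]
    | cons c t =>
      rw [countGo_succ_cons]
      cases t with
      | nil =>
        have hp : List.isPrefixOf ['\\', b] [c] = false := by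
          cases hb2 : ('\\' == c) <;> simp [List.isPrefixOf, hb2]
        rw [if_neg (by simp [hp])]
        rw [ih [] acc (by simp)]
        simp [pairSkip]
      | cons d u =>
        simp only [List.length_cons] at h
        by_cases hpre : List.isPrefixOf ['\\', b] (c :: d :: u) = true
        · have hc : c = '\\' ∧ d = b := by
            simp [List.isPrefixOf] at hpre
            exact ⟨hpre.1.symm, hpre.2.symm⟩
          rw [if_pos hpre]
          simp only [List.length_cons, List.length_nil, List.drop_succ_cons, List.drop_zero]
          rw [ih u (acc + 1) (by omega)]
          have hps : pairSkip b (c :: d :: u) = 1 + pairSkip b u := by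
            simp [pairSkip, hc.1, hc.2]
          rw [hps]
          omega
        · have hc : ¬(c = '\\' ∧ d = b) := by
            intro hcd
            apply hpre
            simp [List.isPrefixOf, hcd.1, hcd.2]
          rw [if_neg hpre]
          rw [ih (d :: u) acc (by simp; omega)]
          simp only [pairSkip, if_neg hc]

theorem countGo_single (ch : Char) (fuel : Nat) (s : List Char) (acc : Nat)
    (h : s.length ≤ fuel) : PySem.Chars.count.go [ch] fuel s acc = acc + s.count ch := by
  induction fuel generalizing s acc with
  | zero =>
    have hs : s = [] := List.eq_nil_of_length_eq_zero (Nat.le_zero.1 h)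
    subst hs
    rw [countGo_zero]
    simp
  | succ f ih =>
    cases s with
    | nil => rw [countGo_succ_nil]; simp
    | cons c t =>
      rw [countGo_succ_cons]
      simp only [List.length_cons] at h
      by_cases hc : ch = c
      · have hpre : List.isPrefixOf [ch] (c :: t) = true := by simp [List.isPrefixOf, hc]
        rw [if_pos hpre]
        simp only [List.length_cons, List.length_nil, List.drop_succ_cons, List.drop_zero]
        rw [ih t (acc + 1) (by omega)]
        simp [hc]
        omega
      · have hpre : ¬ List.isPrefixOf [ch] (c :: t) = true := by simp [List.isPrefixOf, hc]
        rw [if_neg hpre]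
        rw [ih t acc (by omega)]
        simp [Ne.symm hc]

theorem count_single (s : List Char) (ch : Char) :
    PySem.Chars.count s [ch] = s.count ch := by
  rw [PySem.Chars.count]
  simp [countGo_single ch s.length s 0 (le_refl _)]

theorem count_pair (s : List Char) (b : Char) :
    PySem.Chars.count s ['\\', b] = pairSkip b s := by
  rw [PySem.Chars.count]
  simp [countGo_pair b s.length s 0 (le_refl _)]

theorem pairSkip_pos_infix (b : Char) (s : List Char) (h : 0 < pairSkip b s) :
    ['\\', b] <:+: s := by
  induction s using pairSkip.induct b with
  | case1 => simp [pairSkip] at h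
  | case2 => simp [pairSkip] at h
  | case3 c d t hc ih =>
    obtain ⟨h1, h2⟩ := hc
    subst h1; subst h2
    exact ⟨[], t, by simp⟩
  | case4 c d t hc ih =>
    rw [pairSkip] at h
    simp only [if_neg hc] at h
    obtain ⟨s1, t1, hst⟩ := ih h
    exact ⟨c :: s1, t1, by rw [← hst]; simp⟩

theorem mxAux_mono (s : List Char) (run m : Nat) : m ≤ mxAux run m s := by
  induction s generalizing run m with
  | nil => simp [mxAux]
  | cons c t ih =>
    rw [mxAux]
    split_ifs with h1 h2
    · exact ih 0 m
    · exact le_trans (by omega) (ih (run + 1) (run + 1))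
    · exact ih (run + 1) m

theorem mem_acc_go (s : List Char) (cur : List Char) (acc : List (List Char)) (w : List Char)
    (hw : w ∈ acc) : w ∈ PySem.Chars.split₀.go s cur acc := by
  induction s generalizing cur acc with
  | nil =>
    rw [PySem.Chars.split₀.go]
    split_ifs <;> simp [hw]
  | cons c t ih =>
    rw [PySem.Chars.split₀.go]
    split_ifs with h1 h2
    · exact ih [] acc hw
    · exact ih [] (cur.reverse :: acc) (List.mem_cons_of_mem _ hw)
    · exact ih (c :: cur) acc hw

theorem long_cur_go (s : List Char) (cur : List Char) (acc : List (List Char))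
    (hc : 30 < cur.length) : ∃ w ∈ PySem.Chars.split₀.go s cur acc, 30 < w.length := by
  induction s generalizing cur acc with
  | nil =>
    rw [PySem.Chars.split₀.go]
    have : ¬ cur.isEmpty = true := by
      cases cur <;> simp_all
    rw [if_neg this]
    exact ⟨cur.reverse, by simp, by simpa using hc⟩
  | cons c t ih =>
    rw [PySem.Chars.split₀.go]
    split_ifs with h1 h2
    · exact absurd h2 (by cases cur <;> simp_all)
    · exact ⟨cur.reverse, mem_acc_go t [] _ _ (by simp), by simpa using hc⟩
    · exact ih (c :: cur) acc (by simp; omega)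

theorem split_go_iff (s : List Char) (cur : List Char) (acc : List (List Char)) (m : Nat)
    (hm : cur.length ≤ m) :
    ((∃ w ∈ PySem.Chars.split₀.go s cur acc, 30 < w.length) ∨ 30 < m ↔
      (∃ w ∈ acc, 30 < w.length) ∨ 30 < mxAux cur.length m s) := by
  induction s generalizing cur acc m with
  | nil =>
    rw [PySem.Chars.split₀.go, mxAux]
    by_cases hc : cur.isEmpty = true
    · rw [if_pos hc]
      simp
    · rw [if_neg hc]
      simp only [List.mem_reverse, List.mem_cons]
      constructor
      · rintro (⟨w, (rfl | hw), h30⟩ | h30)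
        · simp at h30; omega
        · exact Or.inl ⟨w, hw, h30⟩
        · exact Or.inr h30
      · rintro (⟨w, hw, h30⟩ | h30)
        · exact Or.inl ⟨w, Or.inr hw, h30⟩
        · exact Or.inr h30
  | cons c t ih =>
    rw [PySem.Chars.split₀.go, mxAux]
    by_cases hsp : PySem.Chars.isspace c = true
    · rw [if_pos hsp, if_pos hsp]
      by_cases hc : cur.isEmpty = true
      · rw [if_pos hc]
        simpa using ih [] acc m (by simp)
      · rw [if_neg hc]
        have hih := ih [] (cur.reverse :: acc) m (by simp)
        simp only [List.length_nil] at hih ⊢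
        rw [hih]
        constructor
        · rintro (⟨w, hw, h30⟩ | h30)
          · rcases List.mem_cons.1 hw with rfl | hw'
            · right
              have hle : m ≤ mxAux 0 m t := mxAux_mono t 0 m
              simp at h30
              omega
            · exact Or.inl ⟨w, hw', h30⟩
          · exact Or.inr h30
        · rintro (⟨w, hw, h30⟩ | h30)
          · exact Or.inl ⟨w, List.mem_cons_of_mem _ hw, h30⟩
          · exact Or.inr h30
    · rw [if_neg hsp, if_neg hsp]
      have hih := ih (c :: cur) acc (if m < cur.length + 1 then cur.length + 1 else m)
        (by split_ifs <;> simp <;> omega)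
      simp only [List.length_cons] at hih
      rw [← hih]
      have hmle : m ≤ (if m < cur.length + 1 then cur.length + 1 else m) := by
        split_ifs <;> omega
      constructor
      · rintro (hw | h30)
        · exact Or.inl hw
        · exact Or.inr (by omega)
      · rintro (hw | h30)
        · exact Or.inl hw
        · by_cases hm30 : 30 < m
          · exact Or.inr hm30
          · left
            have hcur : 30 < (c :: cur).length := by
              simp only [List.length_cons]
              split_ifs at h30 <;> omega
            exact long_cur_go t (c :: cur) acc hcur

theorem maxrun_iff (s : List Char) :
    ((PySem.Chars.split₀ s).any (fun w => decide (30 < w.length)) = true ↔ 30 < mxAux 0 0 s) := by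
  have hgo := split_go_iff s [] [] 0 (by simp)
  rw [PySem.Chars.split₀]
  simp only [List.length_nil] at hgo
  simp only [List.any_eq_true, decide_eq_true_eq]
  constructor
  · intro h
    rcases hgo.1 (Or.inl h) with h' | h'
    · simp at h'
    · exact h'
  · intro h
    rcases hgo.2 (Or.inr h) with h' | h'
    · exact h'
    · omega

theorem check_obfuscation_spec : Claim_equal_check_obfuscation := by
  unfold Claim_equal_check_obfuscation
  intro text _
  unfold Spec_check_obfuscation
  have hxl : ("\\x".toList) = ['\\', 'x'] := by decide
  have hul : ("\\u".toList) = ['\\', 'u'] := by decide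
  have hql : ("=".toList) = ['='] := by decide
  have hpll : ("+".toList) = ['+'] := by decide
  have hx : PySem.Chars.count text.toList ['\\', 'x'] = pairSkip 'x' text.toList :=
    count_pair text.toList 'x'
  have hu : PySem.Chars.count text.toList ['\\', 'u'] = pairSkip 'u' text.toList :=
    count_pair text.toList 'u'
  have heq : PySem.Chars.count text.toList ['='] = text.toList.count '=' :=
    count_single text.toList '='
  have hpl : PySem.Chars.count text.toList ['+'] = text.toList.count '+' :=
    count_single text.toList '+'
  have hsx : slide 'x' none text.toList = pairSkip 'x' text.toList := by
    simpa using slide_eq 'x' (by decide) text.toList none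
  have hsu : slide 'u' none text.toList = pairSkip 'u' text.toList := by
    simpa using slide_eq 'u' (by decide) text.toList none
  have h1 : ((PySem.Str.split₀ text).any (fun word => decide ((30 : Int) < PySem.Str.len word)) = true)
      ↔ 30 < mxAux 0 0 text.toList := by
    rw [← maxrun_iff text.toList, ← PySem.Str.split₀_map_toList, List.any_map]
    simp only [List.any_eq_true, Function.comp_apply, decide_eq_true_eq, PySem.Str.len_eq]
    constructor
    · rintro ⟨w, hw, hlen⟩
      exact ⟨w, hw, by exact_mod_cast hlen⟩
    · rintro ⟨w, hw, hlen⟩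
      exact ⟨w, hw, by exact_mod_cast hlen⟩
  have hany : (PySem.Str.split₀ text).any (fun word => decide ((30 : Int) < PySem.Str.len word))
      = decide (30 < mxAux 0 0 text.toList) := by
    rw [Bool.eq_iff_iff]
    simp only [decide_eq_true_eq]
    exact h1
  simp only [check_obfuscation, check_obfuscation_alt, fold_obStep, List.any_cons, List.any_nil,
    id, Bool.or_false, PySem.Str.count_eq, PySem.Str.isIn_eq, hxl, hul, hql, hpll,
    hx, hu, heq, hpl, hsx, hsu, hany, Nat.zero_add, Bool.or_assoc]
  by_cases h20x : 20 < pairSkip 'x' text.toList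
  · have hinx : PySem.Chars.isIn ['\\', 'x'] text.toList = true :=
      (PySem.Chars.isIn_iff_infix _ _).2 (pairSkip_pos_infix 'x' _ (by omega))
    by_cases h20u : 20 < pairSkip 'u' text.toList
    · have hinu : PySem.Chars.isIn ['\\', 'u'] text.toList = true :=
        (PySem.Chars.isIn_iff_infix _ _).2 (pairSkip_pos_infix 'u' _ (by omega))
      simp [h20x, h20u, hinx, hinu]
    · simp [h20x, h20u, hinx]
  · by_cases h20u : 20 < pairSkip 'u' text.toList
    · have hinu : PySem.Chars.isIn ['\\', 'u'] text.toList = true :=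
        (PySem.Chars.isIn_iff_infix _ _).2 (pairSkip_pos_infix 'u' _ (by omega))
      simp [h20x, h20u, hinu]
    · simp [h20x, h20u]
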